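-- pv_equiv track=rewrite | github.com/Designeiir/RCL | rcl.py | get_mask
-- ===== SOURCE A (Python) =====
-- def get_mask(encode_length, max_length):
--     mask = []
--     for i in range(max_length):
--         if i < encode_length:
--             mask.append(False)
--         else:
--             mask.append(True)
--
--     return mask
-- ===== SOURCE B (Python) =====
-- def get_mask(encode_length, max_length):
--     n = max(0, min(encode_length, max_length))
--     return [False] * n + [True] * (max_length - n)
-- ===== Notes on version B (the rewrite author's own statement) =====
-- stated objective: simpler
-- what changed: Replaces the element-wise loop with a per-index branch by a closed-form construction of two constant blocks ([False]*n + [True]*(max_length-n)) at the clamped split point n = max(0, min(encode_length, max_length)).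
import Mathlib
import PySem

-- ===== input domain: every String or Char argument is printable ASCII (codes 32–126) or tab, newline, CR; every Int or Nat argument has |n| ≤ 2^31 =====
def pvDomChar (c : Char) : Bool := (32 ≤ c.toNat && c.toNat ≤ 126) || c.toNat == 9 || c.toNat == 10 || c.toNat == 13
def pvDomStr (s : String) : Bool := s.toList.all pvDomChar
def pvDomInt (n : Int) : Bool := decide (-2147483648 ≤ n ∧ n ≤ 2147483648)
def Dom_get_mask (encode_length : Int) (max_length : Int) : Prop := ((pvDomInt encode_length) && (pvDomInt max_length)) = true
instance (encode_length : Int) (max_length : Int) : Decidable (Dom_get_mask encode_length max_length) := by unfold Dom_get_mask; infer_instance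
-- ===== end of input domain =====

-- ===== PORT A =====
-- B builds the mask as two constant blocks at the clamped split point instead of an index loop (simpler).
def get_mask (encode_length : Int) (max_length : Int) : List Bool :=
  (PySem.List.pyRange 0 max_length 1).foldl
    (fun mask i => mask ++ [if i < encode_length then false else true]) []

-- ===== PORT B =====
def get_mask_alt (encode_length : Int) (max_length : Int) : List Bool :=
  let n : Int := max 0 (min encode_length max_length)
  List.replicate n.toNat false ++ List.replicate (max_length - n).toNat true

-- ===== PRECONDITION & SPEC =====
def Spec_get_mask (encode_length : Int) (max_length : Int) (out : List Bool) : Prop := out = get_mask_alt encode_length max_length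
instance (encode_length : Int) (max_length : Int) (out : List Bool) : Decidable (Spec_get_mask encode_length max_length out) := by unfold Spec_get_mask; infer_instance

-- ===== CLAIM (what is proved, stated in full; the proofs are below) =====
def Claim_equal_get_mask : Prop := ∀ (encode_length : Int) (max_length : Int), Dom_get_mask encode_length max_length → Spec_get_mask encode_length max_length (get_mask encode_length max_length)

-- ===== LEMMAS AND PROOFS =====
theorem map_const_eq_replicate {α β : Type} (l : List α) (f : α → β) (c : β)
    (h : ∀ x ∈ l, f x = c) : l.map f = List.replicate l.length c := by
  induction l with
  | nil => rfl
  | cons a t ih =>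
    simp only [List.map, List.length_cons, List.replicate_succ]
    rw [h a (List.mem_cons_self), ih (fun x hx => h x (List.mem_cons_of_mem a hx))]

-- ===== VERDICT (by name: the statement is the Claim_ definition above) =====
theorem get_mask_spec : Claim_equal_get_mask := by
  intro e m _
  show _ = _
  unfold get_mask get_mask_alt
  rw [PySem.List.foldl_append_singleton_eq_map, List.nil_append]
  set n : Int := max 0 (min e m) with hn
  by_cases hm : m ≤ 0
  · rw [PySem.List.pyRange_one_eq_nil hm]
    have h1 : n.toNat = 0 := by omega
    have h2 : (m - n).toNat = 0 := by omega
    simp [h1, h2]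
  · have h0n : (0:Int) ≤ n := by omega
    have hnm : n ≤ m := by omega
    rw [PySem.List.pyRange_one_append 0 n m h0n hnm]
    rw [List.map_append]
    congr 1
    · rw [map_const_eq_replicate _ _ false (by
        intro x hx
        rw [PySem.List.mem_pyRange_one] at hx
        have : x < e := by omega
        simp [this])]
      rw [PySem.List.length_pyRange_one]
      simp
    · rw [map_const_eq_replicate _ _ true (by
        intro x hx
        rw [PySem.List.mem_pyRange_one] at hx
        have : ¬ x < e := by omega
        simp [this])]
      rw [PySem.List.length_pyRange_one]
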